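-- pv_equiv track=rewrite | github.com/101rror/GeeksforGeeks | Difficulty: Medium/Mother Vertex/mother-vertex.py | findMotherVertex
-- ===== SOURCE A (Python) =====
-- def findMotherVertex(V, edges):
--
--     adj = [[] for _ in range(V)]
--
--     for u, v in edges:
--         adj[u].append(v)
--
--     def dfs(u, visited):
--         visited[u] = True
--
--         for v in adj[u]:
--             if not visited[v]:
--                 dfs(v, visited)
--
--     visited = [False] * V
--     x = -1
--
--     for i in range(V):
--         if not visited[i]:
--             dfs(i, visited)
--             x = i
--
--     visited = [False] * V
--     dfs(x, visited)
--
--     if not all(visited):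
--         return -1
--
--     for i in range(x + 1):
--         visited = [False] * V
--         dfs(i, visited)
--
--         if all(visited):
--             return i
--
--     return x
-- ===== SOURCE B (Python) =====
-- def findMotherVertex(V, edges):
--     adj = [[] for _ in range(V)]
--     radj = [[] for _ in range(V)]
--     for u, v in edges:
--         adj[u].append(v)
--         radj[v].append(u)
--
--     def sweep(g, s, seen):
--         # iterative DFS; marks everything reachable from s through unseen vertices
--         seen[s] = True
--         stack = [s]
--         while stack:
--             u = stack.pop()
--             for v in g[u]:
--                 if not seen[v]:
--                     seen[v] = True
--                     stack.append(v)
--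
--     seen = [False] * V
--     x = -1
--     for i in range(V):
--         if not seen[i]:
--             sweep(adj, i, seen)
--             x = i
--
--     cov = [False] * V
--     sweep(adj, x, cov)
--     if not all(cov):
--         return -1
--
--     # x is a mother vertex; i is a mother vertex iff i reaches x,
--     # i.e. iff x reaches i in the reversed graph: one reverse sweep finds them all
--     rv = [False] * V
--     sweep(radj, x, rv)
--     return rv.index(True)
-- ===== Notes on version B (the rewrite author's own statement) =====
-- stated objective: alternative
-- what changed: A re-runs a fresh recursive DFS from every candidate vertex 0..x to find the smallest mother vertex; B keeps the restart pass, verifies x once, then finds all mother vertices with a single iterative stack-sweep of the reversed graph from x (i is a mother iff i reaches x) and returns the first marked index.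
-- outside the precondition, e.g. on findMotherVertex(2, [(-1, 0)]): A returns 1, B returns 1
import Mathlib
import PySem

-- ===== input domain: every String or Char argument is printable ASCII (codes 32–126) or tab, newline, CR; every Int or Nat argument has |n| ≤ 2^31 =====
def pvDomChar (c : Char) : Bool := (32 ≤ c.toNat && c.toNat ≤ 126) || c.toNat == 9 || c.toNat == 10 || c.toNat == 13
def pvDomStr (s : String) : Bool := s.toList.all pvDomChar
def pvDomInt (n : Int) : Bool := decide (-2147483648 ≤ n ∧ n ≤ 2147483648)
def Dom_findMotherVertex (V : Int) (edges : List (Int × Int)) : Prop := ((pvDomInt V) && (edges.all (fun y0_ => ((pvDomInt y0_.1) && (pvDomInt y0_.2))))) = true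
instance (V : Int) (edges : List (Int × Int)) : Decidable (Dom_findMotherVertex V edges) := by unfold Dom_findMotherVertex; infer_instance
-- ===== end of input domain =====

-- B replaces A's scan that re-runs a fresh DFS from every candidate 0..x by a single
-- sweep of the reversed graph from x (iterative, explicit stack): same value, different algorithm.

-- ===== PORT A =====
-- adj = [[] for _ in range(V)]; for u, v in edges: adj[u].append(v)
def pvBuildAdj (n : Nat) (edges : List (Int × Int)) : List (List Int) :=
  edges.foldl (fun a e => a.modify e.1.toNat (fun l => l ++ [e.2])) (List.replicate n [])

-- A's recursive dfs(u, visited), with fuel; the port calls it with fuel = V.toNat,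
-- which is proved sufficient whenever A itself returns (i.e. under Pre_).
mutual
def dfsA (g : List (List Int)) : Nat → Int → List Bool → List Bool
  | 0, _, vis => vis
  | fuel+1, u, vis => dfsANbrs g fuel (g.getD u.toNat []) (vis.set u.toNat true)
termination_by fuel _ _ => (fuel, 0)
def dfsANbrs (g : List (List Int)) : Nat → List Int → List Bool → List Bool
  | _, [], vis => vis
  | fuel, v :: vs, vis =>
      dfsANbrs g fuel vs (if vis.getD v.toNat false then vis else dfsA g fuel v vis)
termination_by fuel l _ => (fuel, l.length + 1)
end

-- loop body of: for i in range(V): if not visited[i]: dfs(i, visited); x = i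
def pvStepA (adj : List (List Int)) (n : Nat) (p : List Bool × Int) (i : Int) : List Bool × Int :=
  if p.1.getD i.toNat false then p else (dfsA adj n i p.1, i)

def findMotherVertex (V : Int) (edges : List (Int × Int)) : Int :=
  let n := V.toNat
  let adj := pvBuildAdj n edges
  -- visited = [False]*V; x = -1; for i in range(V): ...
  let st := (PySem.List.pyRange 0 V 1).foldl (pvStepA adj n) (List.replicate n false, -1)
  let x := st.2
  -- visited = [False]*V; dfs(x, visited)
  let vis2 := dfsA adj n x (List.replicate n false)
  if vis2.all (fun b => b) then
    -- for i in range(x+1): fresh dfs(i); if all(visited): return i -- then: return x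
    match (PySem.List.pyRange 0 (x+1) 1).find?
        (fun i => (dfsA adj n i (List.replicate n false)).all (fun b => b)) with
    | some i => i
    | none => x
  else -1

-- ===== PORT B =====
-- inner loop body: for v in g[u]: if not seen[v]: seen[v] = True; stack.append(v)
def pvPushStep (p : List Bool × List Int) (v : Int) : List Bool × List Int :=
  if p.1.getD v.toNat false then p else (p.1.set v.toNat true, v :: p.2)

-- while stack: u = stack.pop(); for v in g[u]: ...   (stack top = list head; fuel = V.toNat)
def pvSweepLoop (g : List (List Int)) : Nat → List Int → List Bool → List Bool
  | 0, _, vis => vis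
  | _+1, [], vis => vis
  | fuel+1, u :: rest, vis =>
      let p := (g.getD u.toNat []).foldl pvPushStep (vis, rest)
      pvSweepLoop g fuel p.2 p.1

-- def sweep(g, s, seen): seen[s] = True; stack = [s]; while stack: ...
def pvSweepB (g : List (List Int)) (n : Nat) (s : Int) (vis : List Bool) : List Bool :=
  pvSweepLoop g n [s] (vis.set s.toNat true)

-- loop body of: for i in range(V): if not seen[i]: sweep(adj, i, seen); x = i
def pvStepB (adj : List (List Int)) (n : Nat) (p : List Bool × Int) (i : Int) : List Bool × Int :=
  if p.1.getD i.toNat false then p else (pvSweepB adj n i p.1, i)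

def findMotherVertex_alt (V : Int) (edges : List (Int × Int)) : Int :=
  let n := V.toNat
  -- for u, v in edges: adj[u].append(v); radj[v].append(u)
  let gs := edges.foldl
      (fun (p : List (List Int) × List (List Int)) e =>
        (p.1.modify e.1.toNat (fun l => l ++ [e.2]),
         p.2.modify e.2.toNat (fun l => l ++ [e.1])))
      (List.replicate n [], List.replicate n [])
  let adj := gs.1
  let radj := gs.2
  -- seen = [False]*V; x = -1; for i in range(V): ...
  let st := (PySem.List.pyRange 0 V 1).foldl (pvStepB adj n) (List.replicate n false, -1)
  let x := st.2
  let cov := pvSweepB adj n x (List.replicate n false)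
  if cov.all (fun b => b) then
    let rv := pvSweepB radj n x (List.replicate n false)
    match PySem.List.index? rv true with
    | some j => (j : Int)
    | none => -1   -- unreachable under Pre_: rv[x] is True
  else -1

-- ===== PRECONDITION & SPEC =====
-- Pre_ is the natural domain of the task: at least one vertex, every edge endpoint a valid
-- vertex label in [0, V).  Outside it A raises IndexError (V ≤ 0, or an endpoint ≥ V) or,
-- for negative endpoints, both programs fall into Python's negative-index wraparound, an
-- artefact outside the natural domain (see claim cites: A and B agree there anyway).
def Pre_findMotherVertex (V : Int) (edges : List (Int × Int)) : Prop :=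
  1 ≤ V ∧ ∀ e ∈ edges, 0 ≤ e.1 ∧ e.1 < V ∧ 0 ≤ e.2 ∧ e.2 < V
instance (V : Int) (edges : List (Int × Int)) : Decidable (Pre_findMotherVertex V edges) := by
  unfold Pre_findMotherVertex; infer_instance

def pvWitness_findMotherVertex : Int × (List (Int × Int)) := (4, [(0, 1), (1, 2), (2, 0), (0, 3)])

def Spec_findMotherVertex (V : Int) (edges : List (Int × Int)) (out : Int) : Prop := out = findMotherVertex_alt V edges
instance (V : Int) (edges : List (Int × Int)) (out : Int) : Decidable (Spec_findMotherVertex V edges out) := by unfold Spec_findMotherVertex; infer_instance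

-- ===== CLAIM (what is proved, stated in full; the proofs are below) =====
def Claim_equal_findMotherVertex : Prop := ∀ (V : Int) (edges : List (Int × Int)), Dom_findMotherVertex V edges → Pre_findMotherVertex V edges → Spec_findMotherVertex V edges (findMotherVertex V edges)

-- ===== LEMMAS AND PROOFS =====

-- proof-side twin of pvBuildAdj: the reversed adjacency lists B builds in its edge pass
def pvBuildRAdj (n : Nat) (edges : List (Int × Int)) : List (List Int) :=
  edges.foldl (fun a e => a.modify e.2.toNat (fun l => l ++ [e.1])) (List.replicate n [])

def pvInR (n : Nat) (u : Int) : Prop := 0 ≤ u ∧ u.toNat < n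
def pvWf (n : Nat) (g : List (List Int)) : Prop := ∀ (i : Nat), ∀ v ∈ g.getD i [], 0 ≤ v ∧ v.toNat < n
def pvLe (a b : List Bool) : Prop :=
  a.length = b.length ∧ ∀ j : Nat, a.getD j false = true → b.getD j false = true

theorem pvGetD_set (l : List Bool) (i j : Nat) (x : Bool) :
    (l.set i x).getD j false = if i = j ∧ i < l.length then x else l.getD j false := by
  by_cases hij : i = j
  · subst hij
    by_cases h : i < l.length
    · simp [List.getD_eq_getElem?_getD, List.getElem?_set, h]
    · simp [List.getD_eq_getElem?_getD, List.getElem?_set, h]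
  · simp [List.getD_eq_getElem?_getD, List.getElem?_set, hij]

theorem pvGetD_replicate {α : Type} (n j : Nat) (x : α) : (List.replicate n x).getD j x = x := by
  rcases Nat.lt_or_ge j n with h | h <;>
    simp [List.getD_eq_getElem?_getD, h, List.getElem?_eq_none, List.getElem?_replicate]

theorem pvGetD_modify {α : Type} (l : List α) (i j : Nat) (f : α → α) (d : α) :
    (l.modify i f).getD j d = if i = j ∧ j < l.length then f (l.getD j d) else l.getD j d := by
  induction l generalizing i j with
  | nil => simp [List.getD]
  | cons a t ih =>
    cases i with
    | zero => cases j with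
      | zero => simp [List.modify, List.getD]
      | succ j => simp [List.modify, List.getD]
    | succ i => cases j with
      | zero => simp [List.modify, List.getD]
      | succ j => simpa [List.modify, List.getD, Nat.succ_lt_succ_iff] using ih i j

theorem pvCount_false_set (l : List Bool) : ∀ (i : Nat), i < l.length → l.getD i false = false →
    (l.set i true).count false + 1 = l.count false := by
  induction l with
  | nil => intro i h; simp at h
  | cons a t ih =>
    intro i hi hf
    cases i with
    | zero =>
      have : a = false := by simpa [List.getD] using hf
      simp [this, List.count_cons]
    | succ i =>
      have := ih i (by simpa using hi) (by simpa [List.getD] using hf)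
      rw [List.set_cons_succ, List.count_cons, List.count_cons]
      omega

theorem pvCount_false_pos (l : List Bool) : ∀ (i : Nat), i < l.length → l.getD i false = false →
    0 < l.count false := by
  induction l with
  | nil => intro i h; simp at h
  | cons a t ih =>
    intro i hi hf
    cases i with
    | zero =>
      have : a = false := by simpa [List.getD] using hf
      simp [this, List.count_cons]
    | succ i =>
      have := ih i (by simpa using hi) (by simpa [List.getD] using hf)
      rw [List.count_cons]
      omega

theorem pvCount_false_le (a : List Bool) : ∀ (b : List Bool), a.length = b.length →
    (∀ j : Nat, a.getD j false = true → b.getD j false = true) → b.count false ≤ a.count false := by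
  induction a with
  | nil =>
    intro b hl _
    cases b with
    | nil => simp
    | cons y s => simp at hl
  | cons x t ih =>
    intro b hl hj
    cases b with
    | nil => simp at hl
    | cons y s =>
      have h0 : x = true → y = true := by
        intro hx
        simpa [List.getD] using hj 0 (by simpa [List.getD] using hx)
      have ht : ∀ j : Nat, t.getD j false = true → s.getD j false = true := by
        intro j h
        simpa [List.getD] using hj (j+1) (by simpa [List.getD] using h)
      have hts := ih s (by simpa using hl) ht
      rw [List.count_cons, List.count_cons]
      cases x with
      | true =>
        have hyt : y = true := h0 rfl
        subst hyt
        simpa using hts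
      | false => cases y <;> simp <;> omega

theorem pvLe_refl (a : List Bool) : pvLe a a := ⟨rfl, fun _ h => h⟩

theorem pvLe_trans {a b c : List Bool} (h1 : pvLe a b) (h2 : pvLe b c) : pvLe a c :=
  ⟨h1.1.trans h2.1, fun j h => h2.2 j (h1.2 j h)⟩

theorem pvLe_set (l : List Bool) (i : Nat) : pvLe l (l.set i true) := by
  refine ⟨(List.length_set ..).symm, fun j h => ?_⟩
  rw [pvGetD_set]
  split
  · rfl
  · exact h

theorem pvLe_getD_false {a b : List Bool} (h : pvLe a b) (j : Nat)
    (hb : b.getD j false = false) : a.getD j false = false := by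
  by_cases ha : a.getD j false = true
  · rw [h.2 j ha] at hb; cases hb
  · simpa using ha

inductive pvRA (g : List (List Int)) (vis : List Bool) : Int → Int → Prop
  | refl (u : Int) : pvRA g vis u u
  | step {u v w : Int} : pvRA g vis u v → w ∈ g.getD v.toNat [] →
      vis.getD w.toNat false = false → pvRA g vis u w

theorem pvRA_trans {g vis} {u v w : Int} (h1 : pvRA g vis u v) (h2 : pvRA g vis v w) :
    pvRA g vis u w := by
  induction h2 with
  | refl => exact h1
  | @step v w h1' hmem hun ih => exact pvRA.step ih hmem hun

theorem pvRA_prepend {g vis} {u v w : Int} (hmem : v ∈ g.getD u.toNat [])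
    (hf : vis.getD v.toNat false = false) (h : pvRA g vis v w) : pvRA g vis u w :=
  pvRA_trans (pvRA.step (pvRA.refl u) hmem hf) h

theorem pvRA_anti {g} {vis vis' : List Bool} (hle : pvLe vis vis') {u w : Int}
    (h : pvRA g vis' u w) : pvRA g vis u w := by
  induction h with
  | refl => exact pvRA.refl _
  | @step v w h1' hmem hun ih => exact pvRA.step ih hmem (pvLe_getD_false hle _ hun)

theorem pvRA_inr {g n} (hg : pvWf n g) {u w : Int} (hu : pvInR n u) (h : pvRA g vis u w) :
    pvInR n w := by
  induction h with
  | refl => exact hu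
  | @step v w h1' hmem hun ih => exact hg _ _ hmem

theorem pvRA_head_unseen {g vis} {u v : Int} (h : pvRA g vis u v) :
    v = u ∨ vis.getD v.toNat false = false := by
  cases h with
  | refl => exact Or.inl rfl
  | step _ _ hun => exact Or.inr hun

theorem pvRA_set_start {g n} (hg : pvWf n g) {vis : List Bool} {s w : Int} (hs : pvInR n s)
    (h : pvRA g vis s w) : pvRA g (vis.set s.toNat true) s w := by
  induction h with
  | refl => exact pvRA.refl _
  | @step v w h1 hmem hun ih =>
    have hw := hg _ _ hmem
    by_cases hws : w = s
    · subst hws; exact pvRA.refl _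
    · refine pvRA.step ih hmem ?_
      rw [pvGetD_set]
      have hs0 := hs.1
      have hw0 := hw.1
      have : ¬ (s.toNat = w.toNat ∧ s.toNat < vis.length) := by
        rintro ⟨h1, _⟩
        exact hws (by omega)
      rw [if_neg this]
      exact hun

theorem pvRA_rev {g g' : List (List Int)} {n : Nat} (hg : pvWf n g)
    (hdual : ∀ a b : Int, pvInR n a → pvInR n b →
      (b ∈ g.getD a.toNat [] ↔ a ∈ g'.getD b.toNat []))
    {u w : Int} (hu : pvInR n u) (h : pvRA g (List.replicate n false) u w) :
    pvRA g' (List.replicate n false) w u := by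
  induction h with
  | refl => exact pvRA.refl _
  | @step v w h1 hmem _ ih =>
    have hv : pvInR n v := pvRA_inr hg hu h1
    have hw : pvInR n w := hg _ _ hmem
    refine pvRA_trans (pvRA.step (pvRA.refl w) ((hdual v w hv hw).mp hmem) ?_) ih
    exact pvGetD_replicate ..

-- monotonicity of the two traversals
theorem pvMonoNbrs (g : List (List Int)) (fuel : Nat)
    (hA : ∀ (u : Int) (vis : List Bool), pvLe vis (dfsA g fuel u vis)) :
    ∀ (L : List Int) (vis : List Bool), pvLe vis (dfsANbrs g fuel L vis) := by
  intro L
  induction L with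
  | nil => intro vis; simp only [dfsANbrs]; exact pvLe_refl _
  | cons v vs ih =>
    intro vis
    simp only [dfsANbrs]
    refine pvLe_trans ?_ (ih _)
    split
    · exact pvLe_refl _
    · exact hA v vis

theorem pvMonoA (g : List (List Int)) : ∀ (fuel : Nat) (u : Int) (vis : List Bool),
    pvLe vis (dfsA g fuel u vis) := by
  intro fuel
  induction fuel with
  | zero => intro u vis; simp only [dfsA]; exact pvLe_refl _
  | succ f ih =>
    intro u vis
    simp only [dfsA]
    exact pvLe_trans (pvLe_set _ _) (pvMonoNbrs g f ih _ _)

-- soundness of A's dfs: everything newly marked is pvRA-reachable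
theorem pvSoundNbrs (g : List (List Int)) (n : Nat) (fuel : Nat)
    (hA : ∀ (u : Int) (vis : List Bool) (w : Int), 0 ≤ u → pvInR n w → vis.length = n →
      (dfsA g fuel u vis).getD w.toNat false = true →
      vis.getD w.toNat false = true ∨ pvRA g vis u w) :
    ∀ (L : List Int) (vis : List Bool) (w : Int), (∀ v ∈ L, 0 ≤ v) → pvInR n w →
      vis.length = n → (dfsANbrs g fuel L vis).getD w.toNat false = true →
      vis.getD w.toNat false = true ∨ ∃ v ∈ L, vis.getD v.toNat false = false ∧ pvRA g vis v w := by
  intro L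
  induction L with
  | nil => intro vis w _ _ _ h; simp only [dfsANbrs] at h; exact Or.inl h
  | cons v vs ih =>
    intro vis w hL hw hlen h
    simp only [dfsANbrs] at h
    by_cases hv : vis.getD v.toNat false
    · rw [if_pos hv] at h
      rcases ih vis w (fun x hx => hL x (List.mem_cons_of_mem _ hx)) hw hlen h with h' | ⟨v', hv', hf', hra'⟩
      · exact Or.inl h'
      · exact Or.inr ⟨v', List.mem_cons_of_mem _ hv', hf', hra'⟩
    · rw [if_neg hv] at h
      have hv' : vis.getD v.toNat false = false := by simpa using hv
      have hle : pvLe vis (dfsA g fuel v vis) := pvMonoA g fuel v vis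
      rcases ih _ w (fun x hx => hL x (List.mem_cons_of_mem _ hx)) hw (hle.1 ▸ hlen) h with h' | ⟨v', hv', hf', hra'⟩
      · rcases hA v vis w (hL v (List.mem_cons_self ..)) hw hlen h' with h'' | hra
        · exact Or.inl h''
        · exact Or.inr ⟨v, List.mem_cons_self .., hv', hra⟩
      · exact Or.inr ⟨v', List.mem_cons_of_mem _ hv',
          pvLe_getD_false hle _ hf', pvRA_anti hle hra'⟩

theorem pvSoundA (g : List (List Int)) (n : Nat) (hg : pvWf n g) :
    ∀ (fuel : Nat) (u : Int) (vis : List Bool) (w : Int), 0 ≤ u → pvInR n w →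
      vis.length = n → (dfsA g fuel u vis).getD w.toNat false = true →
      vis.getD w.toNat false = true ∨ pvRA g vis u w := by
  intro fuel
  induction fuel with
  | zero => intro u vis w _ _ _ h; simp only [dfsA] at h; exact Or.inl h
  | succ f ih =>
    intro u vis w hu hw hlen h
    simp only [dfsA] at h
    have hlen1 : (vis.set u.toNat true).length = n := by rw [List.length_set]; exact hlen
    rcases pvSoundNbrs g n f ih (g.getD u.toNat []) _ w
        (fun x hx => (hg _ _ hx).1) hw hlen1 h with h' | ⟨v, hv, hf, hra⟩
    · rw [pvGetD_set] at h'
      by_cases hc : u.toNat = w.toNat ∧ u.toNat < vis.length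
      · have : u = w := by have hw1 := hw.1; omega
        subst this
        exact Or.inr (pvRA.refl _)
      · rw [if_neg hc] at h'
        exact Or.inl h'
    · have hfv : vis.getD v.toNat false = false := pvLe_getD_false (pvLe_set _ _) _ hf
      exact Or.inr (pvRA_prepend hv hfv (pvRA_anti (pvLe_set _ _) hra))

-- completeness of A's dfs: the start is marked and the new marks are closed under edges
theorem pvComplNbrs (g : List (List Int)) (n : Nat) (fuel : Nat)
    (hA : ∀ (u : Int) (vis : List Bool), pvInR n u → vis.length = n →
      vis.getD u.toNat false = false → vis.count false ≤ fuel →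
      (dfsA g fuel u vis).getD u.toNat false = true ∧
      ∀ (a : Int), pvInR n a → vis.getD a.toNat false = false →
        (dfsA g fuel u vis).getD a.toNat false = true →
        ∀ b ∈ g.getD a.toNat [], (dfsA g fuel u vis).getD b.toNat false = true) :
    ∀ (L : List Int) (vis : List Bool), (∀ v ∈ L, pvInR n v) → vis.length = n →
      vis.count false ≤ fuel →
      (∀ v ∈ L, (dfsANbrs g fuel L vis).getD v.toNat false = true) ∧
      ∀ (a : Int), pvInR n a → vis.getD a.toNat false = false →
        (dfsANbrs g fuel L vis).getD a.toNat false = true →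
        ∀ b ∈ g.getD a.toNat [], (dfsANbrs g fuel L vis).getD b.toNat false = true := by
  intro L
  induction L with
  | nil =>
    intro vis _ _ _
    refine ⟨by simp, ?_⟩
    intro a _ hfa ha b _
    simp only [dfsANbrs] at ha
    rw [hfa] at ha; cases ha
  | cons v vs ih =>
    intro vis hL hlen hcf
    have hvin : pvInR n v := hL v (List.mem_cons_self ..)
    -- the state after handling the head neighbour
    set vis₂ := if vis.getD v.toNat false then vis else dfsA g fuel v vis with hvis₂
    have hle2 : pvLe vis vis₂ := by
      rw [hvis₂]; split
      · exact pvLe_refl _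
      · exact pvMonoA g fuel v vis
    have hlen2 : vis₂.length = n := hle2.1 ▸ hlen
    have hcf2 : vis₂.count false ≤ fuel := le_trans (pvCount_false_le vis vis₂ hle2.1 hle2.2) hcf
    have heq : dfsANbrs g fuel (v :: vs) vis = dfsANbrs g fuel vs vis₂ := by
      simp only [dfsANbrs, hvis₂]
    have ihs := ih vis₂ (fun x hx => hL x (List.mem_cons_of_mem _ hx)) hlen2 hcf2
    have hle3 : pvLe vis₂ (dfsANbrs g fuel vs vis₂) := pvMonoNbrs g fuel (fun u vis => pvMonoA g fuel u vis) vs vis₂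
    have hvmark : vis₂.getD v.toNat false = true := by
      rw [hvis₂]
      by_cases hv : vis.getD v.toNat false
      · rw [if_pos hv]; exact hv
      · rw [if_neg hv]
        exact (hA v vis hvin hlen (by simpa using hv) hcf).1
    constructor
    · intro v' hv'
      rcases List.mem_cons.mp hv' with rfl | hv'
      · rw [heq]; exact hle3.2 _ hvmark
      · rw [heq]; exact ihs.1 v' hv'
    · intro a ha hfa hmarked b hb
      rw [heq] at hmarked ⊢
      by_cases h2 : vis₂.getD a.toNat false = true
      · -- a was marked while handling v: the head call already closed it
        have hv : ¬ vis.getD v.toNat false = true := by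
          intro hv
          rw [hvis₂, if_pos hv] at h2
          rw [h2] at hfa; cases hfa
        have hvf : vis.getD v.toNat false = false := by simpa using hv
        have h2' : (dfsA g fuel v vis).getD a.toNat false = true := by
          rw [hvis₂, if_neg hv] at h2; exact h2
        have hclosed := (hA v vis hvin hlen hvf hcf).2 a ha hfa h2' b hb
        have : vis₂.getD b.toNat false = true := by rw [hvis₂, if_neg hv]; exact hclosed
        exact hle3.2 _ this
      · have hfa2 : vis₂.getD a.toNat false = false := by simpa using h2
        exact ihs.2 a ha hfa2 hmarked b hb

theorem pvComplA (g : List (List Int)) (n : Nat) (hg : pvWf n g) :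
    ∀ (fuel : Nat) (u : Int) (vis : List Bool), pvInR n u → vis.length = n →
      vis.getD u.toNat false = false → vis.count false ≤ fuel →
      (dfsA g fuel u vis).getD u.toNat false = true ∧
      ∀ (a : Int), pvInR n a → vis.getD a.toNat false = false →
        (dfsA g fuel u vis).getD a.toNat false = true →
        ∀ b ∈ g.getD a.toNat [], (dfsA g fuel u vis).getD b.toNat false = true := by
  intro fuel
  induction fuel with
  | zero =>
    intro u vis hu hlen hf hcf
    have := pvCount_false_pos vis u.toNat (hlen ▸ hu.2) hf
    omega
  | succ f ih =>
    intro u vis hu hlen hf hcf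
    have hlen1 : (vis.set u.toNat true).length = n := by rw [List.length_set]; exact hlen
    have hcf1 : (vis.set u.toNat true).count false ≤ f := by
      have := pvCount_false_set vis u.toNat (hlen ▸ hu.2) hf
      omega
    have hnbrs := pvComplNbrs g n f ih (g.getD u.toNat []) (vis.set u.toNat true)
      (fun x hx => hg _ _ hx) hlen1 hcf1
    have heq : dfsA g (f+1) u vis = dfsANbrs g f (g.getD u.toNat []) (vis.set u.toNat true) := by
      simp only [dfsA]
    have hle : pvLe (vis.set u.toNat true) (dfsANbrs g f (g.getD u.toNat []) (vis.set u.toNat true)) :=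
      pvMonoNbrs g f (fun u vis => pvMonoA g f u vis) _ _
    have humark : (vis.set u.toNat true).getD u.toNat false = true := by
      rw [pvGetD_set]
      simp [hlen ▸ hu.2]
    constructor
    · rw [heq]; exact hle.2 _ humark
    · intro a ha hfa hmarked b hb
      rw [heq] at hmarked ⊢
      by_cases hau : a.toNat = u.toNat
      · have : a = u := by have ha1 := ha.1; have hu1 := hu.1; omega
        subst this
        exact hnbrs.1 b hb
      · have hfa1 : (vis.set u.toNat true).getD a.toNat false = false := by
          rw [pvGetD_set]
          simp only [if_neg (by omega : ¬ (u.toNat = a.toNat ∧ u.toNat < vis.length))]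
          exact hfa
        exact hnbrs.2 a ha hfa1 hmarked b hb

-- characterisation of A's dfs at fuel = n
theorem pvMarkPath (g : List (List Int)) (n : Nat) (hg : pvWf n g) {u : Int} {vis : List Bool}
    (hu : pvInR n u) (hlen : vis.length = n) (hf : vis.getD u.toNat false = false)
    {w : Int} (h : pvRA g vis u w) : (dfsA g n u vis).getD w.toNat false = true := by
  have hcf : vis.count false ≤ n := hlen ▸ List.count_le_length
  induction h with
  | refl => exact (pvComplA g n hg n u vis hu hlen hf hcf).1
  | @step v w h1 hmem hun ih =>
    have hvun : vis.getD v.toNat false = false := by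
      rcases pvRA_head_unseen h1 with rfl | h
      · exact hf
      · exact h
    have hvin : pvInR n v := pvRA_inr hg hu h1
    exact (pvComplA g n hg n u vis hu hlen hf hcf).2 v hvin hvun ih w hmem

theorem pvCharA (g : List (List Int)) (n : Nat) (hg : pvWf n g) {u : Int} {vis : List Bool}
    (hu : pvInR n u) (hlen : vis.length = n) (hf : vis.getD u.toNat false = false)
    {w : Int} (hw : pvInR n w) :
    (dfsA g n u vis).getD w.toNat false = true ↔
      vis.getD w.toNat false = true ∨ pvRA g vis u w := by
  constructor
  · exact pvSoundA g n hg n u vis w hu.1 hw hlen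
  · rintro (h | h)
    · exact (pvMonoA g n u vis).2 _ h
    · exact pvMarkPath g n hg hu hlen hf h

-- the push fold of B's inner for-loop
theorem pvPushLe : ∀ (L : List Int) (vis : List Bool) (st : List Int),
    pvLe vis (L.foldl pvPushStep (vis, st)).1 := by
  intro L
  induction L with
  | nil => intro vis st; exact pvLe_refl _
  | cons v vs ih =>
    intro vis st
    simp only [List.foldl_cons, pvPushStep]
    split
    · exact ih vis st
    · exact pvLe_trans (pvLe_set _ _) (ih _ _)

theorem pvPush (n : Nat) : ∀ (L : List Int) (vis : List Bool) (st : List Int),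
    (∀ v ∈ L, pvInR n v) → vis.length = n →
    ((L.foldl pvPushStep (vis, st)).2.length + (L.foldl pvPushStep (vis, st)).1.count false
        ≤ st.length + vis.count false) ∧
    (∀ s ∈ (L.foldl pvPushStep (vis, st)).2, s ∈ st ∨ (s ∈ L ∧ vis.getD s.toNat false = false)) ∧
    (∀ s ∈ st, s ∈ (L.foldl pvPushStep (vis, st)).2) ∧
    (∀ w : Int, 0 ≤ w → (L.foldl pvPushStep (vis, st)).1.getD w.toNat false = true →
        vis.getD w.toNat false = true ∨
          (w ∈ L ∧ vis.getD w.toNat false = false ∧ w ∈ (L.foldl pvPushStep (vis, st)).2)) ∧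
    (∀ v ∈ L, (L.foldl pvPushStep (vis, st)).1.getD v.toNat false = true) := by
  intro L
  induction L with
  | nil =>
    intro vis st _ _
    exact ⟨le_refl _, fun s hs => Or.inl hs, fun s hs => hs,
      fun w _ h => Or.inl h, by simp⟩
  | cons v vs ih =>
    intro vis st hL hlen
    have hvin : pvInR n v := hL v (List.mem_cons_self ..)
    have hLtl : ∀ x ∈ vs, pvInR n x := fun x hx => hL x (List.mem_cons_of_mem _ hx)
    by_cases hv : vis.getD v.toNat false
    · -- v already seen: state unchanged
      have heq : (v :: vs).foldl pvPushStep (vis, st) = vs.foldl pvPushStep (vis, st) := by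
        simp only [List.foldl_cons, pvPushStep, if_pos hv]
      obtain ⟨f2, f3, f4, f5, f6⟩ := ih vis st hLtl hlen
      rw [heq]
      refine ⟨f2, ?_, f4, ?_, ?_⟩
      · intro s hs
        rcases f3 s hs with h | ⟨h1, h2⟩
        · exact Or.inl h
        · exact Or.inr ⟨List.mem_cons_of_mem _ h1, h2⟩
      · intro w hw h
        rcases f5 w hw h with h | ⟨h1, h2, h3⟩
        · exact Or.inl h
        · exact Or.inr ⟨List.mem_cons_of_mem _ h1, h2, h3⟩
      · intro v' hv'
        rcases List.mem_cons.mp hv' with rfl | hv'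
        · exact (pvPushLe vs vis st).2 _ hv
        · exact f6 v' hv'
    · -- v unseen: mark it and push it
      have hvf : vis.getD v.toNat false = false := by simpa using hv
      set vis' := vis.set v.toNat true with hvis'
      have heq : (v :: vs).foldl pvPushStep (vis, st) = vs.foldl pvPushStep (vis', v :: st) := by
        simp only [List.foldl_cons, pvPushStep, if_neg hv, hvis']
      have hlen' : vis'.length = n := by rw [hvis', List.length_set]; exact hlen
      obtain ⟨f2, f3, f4, f5, f6⟩ := ih vis' (v :: st) hLtl hlen'
      have hcnt : vis'.count false + 1 = vis.count false :=
        pvCount_false_set vis v.toNat (hlen ▸ hvin.2) hvf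
      have hunseen' : ∀ w : Int, 0 ≤ w → vis'.getD w.toNat false = false →
          vis.getD w.toNat false = false := fun w _ h => pvLe_getD_false (pvLe_set _ _) _ h
      have hsetD : ∀ w : Int, 0 ≤ w → vis'.getD w.toNat false = true →
          vis.getD w.toNat false = true ∨ w = v := by
        intro w hw h
        rw [hvis', pvGetD_set] at h
        by_cases hc : v.toNat = w.toNat ∧ v.toNat < vis.length
        · exact Or.inr (by have hv1 := hvin.1; omega)
        · rw [if_neg hc] at h; exact Or.inl h
      rw [heq]
      refine ⟨?_, ?_, ?_, ?_, ?_⟩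
      · calc (vs.foldl pvPushStep (vis', v :: st)).2.length
              + (vs.foldl pvPushStep (vis', v :: st)).1.count false
            ≤ (v :: st).length + vis'.count false := f2
          _ = st.length + vis.count false := by simp; omega
      · intro s hs
        rcases f3 s hs with h | ⟨h1, h2⟩
        · rcases List.mem_cons.mp h with rfl | h
          · exact Or.inr ⟨List.mem_cons_self .., hvf⟩
          · exact Or.inl h
        · exact Or.inr ⟨List.mem_cons_of_mem _ h1, hunseen' s (hLtl s h1).1 h2⟩
      · intro s hs
        exact f4 s (List.mem_cons_of_mem _ hs)
      · intro w hw h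
        rcases f5 w hw h with h' | ⟨h1, h2, h3⟩
        · rcases hsetD w hw h' with h'' | rfl
          · exact Or.inl h''
          · exact Or.inr ⟨List.mem_cons_self .., hvf, f4 w (List.mem_cons_self ..)⟩
        · exact Or.inr ⟨List.mem_cons_of_mem _ h1, hunseen' w hw h2, h3⟩
      · intro v' hv'
        rcases List.mem_cons.mp hv' with rfl | hv'
        · refine (pvPushLe vs vis' (v' :: st)).2 _ ?_
          rw [hvis', pvGetD_set]
          simp [hlen ▸ hvin.2]
        · exact f6 v' hv'

theorem pvMonoLoop (g : List (List Int)) : ∀ (fuel : Nat) (stack : List Int) (vis : List Bool),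
    pvLe vis (pvSweepLoop g fuel stack vis) := by
  intro fuel
  induction fuel with
  | zero => intro stack vis; simp only [pvSweepLoop]; exact pvLe_refl _
  | succ f ih =>
    intro stack vis
    cases stack with
    | nil => simp only [pvSweepLoop]; exact pvLe_refl _
    | cons u rest =>
      simp only [pvSweepLoop]
      exact pvLe_trans (pvPushLe _ _ _) (ih _ _)

theorem pvSoundLoop (g : List (List Int)) (n : Nat) (hg : pvWf n g) :
    ∀ (fuel : Nat) (stack : List Int) (vis : List Bool) (w : Int),
      (∀ s ∈ stack, 0 ≤ s) → pvInR n w → vis.length = n →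
      (pvSweepLoop g fuel stack vis).getD w.toNat false = true →
      vis.getD w.toNat false = true ∨ ∃ s ∈ stack, pvRA g vis s w := by
  intro fuel
  induction fuel with
  | zero => intro stack vis w _ _ _ h; simp only [pvSweepLoop] at h; exact Or.inl h
  | succ f ih =>
    intro stack vis w hst hw hlen h
    cases stack with
    | nil => simp only [pvSweepLoop] at h; exact Or.inl h
    | cons u rest =>
      simp only [pvSweepLoop] at h
      have hLin : ∀ v ∈ g.getD u.toNat [], pvInR n v := fun v hv => hg _ _ hv
      obtain ⟨f2, f3, f4, f5, f6⟩ := pvPush n (g.getD u.toNat []) vis rest hLin hlen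
      have hle : pvLe vis ((g.getD u.toNat []).foldl pvPushStep (vis, rest)).1 := pvPushLe _ _ _
      have hst' : ∀ s ∈ ((g.getD u.toNat []).foldl pvPushStep (vis, rest)).2, 0 ≤ s := by
        intro s hs
        rcases f3 s hs with h' | ⟨h1, _⟩
        · exact hst s (List.mem_cons_of_mem _ h')
        · exact (hLin s h1).1
      rcases ih _ _ w hst' hw (hle.1 ▸ hlen) h with h' | ⟨s, hs, hra⟩
      · rcases f5 w hw.1 h' with h'' | ⟨h1, h2, _⟩
        · exact Or.inl h''
        · exact Or.inr ⟨u, List.mem_cons_self .., pvRA.step (pvRA.refl u) h1 h2⟩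
      · have hra' : pvRA g vis s w := pvRA_anti hle hra
        rcases f3 s hs with h' | ⟨h1, h2⟩
        · exact Or.inr ⟨s, List.mem_cons_of_mem _ h', hra'⟩
        · exact Or.inr ⟨u, List.mem_cons_self .., pvRA_prepend h1 h2 hra'⟩

theorem pvComplLoop (g : List (List Int)) (n : Nat) (hg : pvWf n g) :
    ∀ (fuel : Nat) (stack : List Int) (vis : List Bool), vis.length = n →
      (∀ s ∈ stack, vis.getD s.toNat false = true ∧ pvInR n s) →
      stack.length + vis.count false ≤ fuel →
      ∀ (a : Int), pvInR n a →
        (a ∈ stack ∨ (vis.getD a.toNat false = false ∧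
          (pvSweepLoop g fuel stack vis).getD a.toNat false = true)) →
        ∀ b ∈ g.getD a.toNat [], (pvSweepLoop g fuel stack vis).getD b.toNat false = true := by
  intro fuel
  induction fuel with
  | zero =>
    intro stack vis _ _ hmeas a _ hcond b _
    have hstack : stack = [] := by
      cases stack
      · rfl
      · simp at hmeas
    subst hstack
    simp only [pvSweepLoop] at hcond ⊢
    rcases hcond with h | ⟨h1, h2⟩
    · simp at h
    · rw [h1] at h2; cases h2
  | succ f ih =>
    intro stack vis hlen hst hmeas a ha hcond b hb
    cases stack with
    | nil =>
      simp only [pvSweepLoop] at hcond ⊢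
      rcases hcond with h | ⟨h1, h2⟩
      · simp at h
      · rw [h1] at h2; cases h2
    | cons u rest =>
      simp only [pvSweepLoop] at hcond ⊢
      have hLin : ∀ v ∈ g.getD u.toNat [], pvInR n v := fun v hv => hg _ _ hv
      obtain ⟨f2, f3, f4, f5, f6⟩ := pvPush n (g.getD u.toNat []) vis rest hLin hlen
      set q := (g.getD u.toNat []).foldl pvPushStep (vis, rest) with hq
      have hle : pvLe vis q.1 := pvPushLe _ _ _
      have hlen' : q.1.length = n := hle.1 ▸ hlen
      have hst' : ∀ s ∈ q.2, q.1.getD s.toNat false = true ∧ pvInR n s := by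
        intro s hs
        rcases f3 s hs with h' | ⟨h1, _⟩
        · exact ⟨hle.2 _ (hst s (List.mem_cons_of_mem _ h')).1,
            (hst s (List.mem_cons_of_mem _ h')).2⟩
        · exact ⟨f6 s h1, hLin s h1⟩
      have hmeas' : q.2.length + q.1.count false ≤ f := by
        have := f2
        simp at hmeas
        omega
      have hloopmono : pvLe q.1 (pvSweepLoop g f q.2 q.1) := pvMonoLoop g f q.2 q.1
      rcases hcond with hmem | ⟨hfa, hmarked⟩
      · rcases List.mem_cons.mp hmem with rfl | hmem
        · -- a = u : its neighbours were all marked by the push fold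
          exact hloopmono.2 _ (f6 b hb)
        · -- a in rest : a is on the new stack
          exact ih q.2 q.1 hlen' hst' hmeas' a ha (Or.inl (f4 a hmem)) b hb
      · by_cases h2 : q.1.getD a.toNat false = true
        · rcases f5 a ha.1 h2 with h' | ⟨_, _, h3⟩
          · rw [hfa] at h'; cases h'
          · exact ih q.2 q.1 hlen' hst' hmeas' a ha (Or.inl h3) b hb
        · have hfa' : q.1.getD a.toNat false = false := by simpa using h2
          exact ih q.2 q.1 hlen' hst' hmeas' a ha (Or.inr ⟨hfa', hmarked⟩) b hb

theorem pvCharB (g : List (List Int)) (n : Nat) (hg : pvWf n g) {s : Int} {vis : List Bool}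
    (hs : pvInR n s) (hlen : vis.length = n) (hf : vis.getD s.toNat false = false)
    {w : Int} (hw : pvInR n w) :
    (pvSweepB g n s vis).getD w.toNat false = true ↔
      vis.getD w.toNat false = true ∨ pvRA g vis s w := by
  have hlen1 : (vis.set s.toNat true).length = n := by rw [List.length_set]; exact hlen
  have hsmark : (vis.set s.toNat true).getD s.toNat false = true := by
    rw [pvGetD_set]; simp [hlen ▸ hs.2]
  have hmeas : (1 : Nat) + (vis.set s.toNat true).count false ≤ n := by
    have h1 := pvCount_false_set vis s.toNat (hlen ▸ hs.2) hf
    have h2 : vis.count false ≤ vis.length := List.count_le_length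
    omega
  constructor
  · intro h
    rcases pvSoundLoop g n hg n [s] (vis.set s.toNat true) w
        (by intro t ht; simp at ht; subst ht; exact hs.1) hw hlen1 h with h' | ⟨t, ht, hra⟩
    · rw [pvGetD_set] at h'
      by_cases hc : s.toNat = w.toNat ∧ s.toNat < vis.length
      · have : s = w := by have hs1 := hs.1; have hw1 := hw.1; omega
        subst this
        exact Or.inr (pvRA.refl _)
      · rw [if_neg hc] at h'; exact Or.inl h'
    · simp only [List.mem_singleton] at ht
      subst ht
      exact Or.inr (pvRA_anti (pvLe_set _ _) hra)
  · rintro (h | h)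
    · exact pvLe_trans (pvLe_set _ _) (pvMonoLoop g n [s] _) |>.2 _ h
    · have h1 : pvRA g (vis.set s.toNat true) s w := pvRA_set_start hg hs h
      -- mark every pvRA-target by closedness of the sweep
      have : ∀ w' : Int, pvRA g (vis.set s.toNat true) s w' →
          (pvSweepB g n s vis).getD w'.toNat false = true := by
        intro w' h'
        induction h' with
        | refl => exact (pvMonoLoop g n [s] _).2 _ hsmark
        | @step v w'' hvv hmem hun ih =>
          have hvun : (vis.set s.toNat true).getD v.toNat false = false ∨ v = s := by
            rcases pvRA_head_unseen hvv with rfl | h''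
            · exact Or.inr rfl
            · exact Or.inl h''
          have hvin : pvInR n v := pvRA_inr hg hs hvv
          refine pvComplLoop g n hg n [s] (vis.set s.toNat true) hlen1
            (by intro t ht; simp at ht; subst ht; exact ⟨hsmark, hs⟩)
            (by simpa using hmeas) v hvin ?_ w'' hmem
          rcases hvun with h'' | rfl
          · exact Or.inr ⟨h'', ih⟩
          · exact Or.inl (List.mem_singleton.mpr rfl)
      exact this w h1

-- the two traversals mark the same list
theorem pvBoolExt {a b : List Bool} (hlen : a.length = b.length)
    (h : ∀ j : Nat, j < a.length → (a.getD j false = true ↔ b.getD j false = true)) : a = b := by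
  apply List.ext_getElem hlen
  intro i h1 h2
  have := h i h1
  rw [List.getD_eq_getElem?_getD, List.getD_eq_getElem?_getD] at this
  simp only [List.getElem?_eq_getElem h1, List.getElem?_eq_getElem h2] at this
  simp only [Option.getD_some] at this
  cases hA : a[i] <;> cases hB : b[i] <;> simp_all

theorem pvDfsEqSweep (g : List (List Int)) (n : Nat) (hg : pvWf n g) {u : Int}
    {vis : List Bool} (hu : pvInR n u) (hlen : vis.length = n)
    (hf : vis.getD u.toNat false = false) :
    dfsA g n u vis = pvSweepB g n u vis := by
  have hlA : (dfsA g n u vis).length = n := (pvMonoA g n u vis).1 ▸ hlen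
  have hlB : (pvSweepB g n u vis).length = n := by
    have := pvLe_trans (pvLe_set vis u.toNat) (pvMonoLoop g n [u] _)
    exact this.1 ▸ hlen
  refine pvBoolExt (hlA.trans hlB.symm) ?_
  intro j hj
  rw [hlA] at hj
  have hw : pvInR n ((j : Nat) : Int) := ⟨Int.natCast_nonneg j, by simpa using hj⟩
  have h1 := pvCharA g n hg hu hlen hf hw
  have h2 := pvCharB g n hg hu hlen hf hw
  rw [Int.toNat_natCast] at h1 h2
  rw [h1, h2]

-- phase 1 (the restart loop) produces identical states in A and B
theorem pvPhase1 (adj : List (List Int)) (n : Nat) (hg : pvWf n adj) :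
    ∀ (l : List Int), (∀ i ∈ l, pvInR n i) → ∀ (p : List Bool × Int), p.1.length = n →
      pvInR n p.2 →
      (l.foldl (pvStepA adj n) p = l.foldl (pvStepB adj n) p ∧
        (l.foldl (pvStepA adj n) p).1.length = n ∧ pvInR n (l.foldl (pvStepA adj n) p).2) := by
  intro l
  induction l with
  | nil => intro _ p h1 h2; exact ⟨rfl, h1, h2⟩
  | cons i t ih =>
    intro hl p hp1 hp2
    have hiin : pvInR n i := hl i (List.mem_cons_self ..)
    by_cases hseen : p.1.getD i.toNat false
    · have hA : pvStepA adj n p i = p := by unfold pvStepA; rw [if_pos hseen]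
      have hB : pvStepB adj n p i = p := by unfold pvStepB; rw [if_pos hseen]
      simp only [List.foldl_cons, hA, hB]
      exact ih (fun x hx => hl x (List.mem_cons_of_mem _ hx)) p hp1 hp2
    · have hf : p.1.getD i.toNat false = false := by simpa using hseen
      have heq : dfsA adj n i p.1 = pvSweepB adj n i p.1 := pvDfsEqSweep adj n hg hiin hp1 hf
      have hf' : ¬ p.1.getD i.toNat false = true := by rw [hf]; simp
      have hA : pvStepA adj n p i = (dfsA adj n i p.1, i) := by
        unfold pvStepA; rw [if_neg hf']
      have hB : pvStepB adj n p i = (dfsA adj n i p.1, i) := by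
        unfold pvStepB; rw [if_neg hf', heq]
      simp only [List.foldl_cons, hA, hB]
      exact ih (fun x hx => hl x (List.mem_cons_of_mem _ hx)) _
        ((pvMonoA adj n i p.1).1 ▸ hp1) hiin

-- building the adjacency lists
theorem pvBuildPairAux :
    ∀ (l : List (Int × Int)) (a b : List (List Int)),
      l.foldl
        (fun (p : List (List Int) × List (List Int)) e =>
          (p.1.modify e.1.toNat (fun bl => bl ++ [e.2]), p.2.modify e.2.toNat (fun bl => bl ++ [e.1])))
        (a, b)
      = (l.foldl (fun a e => a.modify e.1.toNat (fun bl => bl ++ [e.2])) a,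
         l.foldl (fun a e => a.modify e.2.toNat (fun bl => bl ++ [e.1])) b) := by
  intro l
  induction l with
  | nil => intro a b; rfl
  | cons x t ih => intro a b; simp only [List.foldl_cons]; exact ih _ _

theorem pvBuildPair (n : Nat) (edges : List (Int × Int)) :
    edges.foldl
      (fun (p : List (List Int) × List (List Int)) e =>
        (p.1.modify e.1.toNat (fun l => l ++ [e.2]), p.2.modify e.2.toNat (fun l => l ++ [e.1])))
      (List.replicate n [], List.replicate n []) = (pvBuildAdj n edges, pvBuildRAdj n edges) := by
  unfold pvBuildAdj pvBuildRAdj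
  exact pvBuildPairAux edges _ _

theorem pvMemBuild (n : Nat) (k val : Int × Int → Int) :
    ∀ (l : List (Int × Int)) (acc : List (List Int)), acc.length = n →
      (∀ e ∈ l, 0 ≤ k e ∧ (k e).toNat < n) → ∀ (a b : Int), pvInR n a →
      (b ∈ (l.foldl (fun acc e => acc.modify (k e).toNat (fun bl => bl ++ [val e])) acc).getD a.toNat []
        ↔ b ∈ acc.getD a.toNat [] ∨ ∃ e ∈ l, k e = a ∧ val e = b) := by
  intro l
  induction l with
  | nil => intro acc _ _ a b _; simp
  | cons e t ih =>
    intro acc hacc hl a b ha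
    have hke := hl e (List.mem_cons_self ..)
    simp only [List.foldl_cons]
    rw [ih _ (by rw [List.length_modify]; exact hacc) (fun x hx => hl x (List.mem_cons_of_mem _ hx)) a b ha]
    rw [pvGetD_modify]
    by_cases hc : (k e).toNat = a.toNat
    · have hka : k e = a := by have h1 := hke.1; have h2 := ha.1; omega
      rw [if_pos ⟨hc, hacc ▸ ha.2⟩]
      constructor
      · rintro (h | h)
        · rcases List.mem_append.mp h with h' | h'
          · exact Or.inl h'
          · simp only [List.mem_singleton] at h'
            exact Or.inr ⟨e, List.mem_cons_self .., hka, h'.symm⟩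
        · exact Or.inr (by rcases h with ⟨e', he', h1, h2⟩; exact ⟨e', List.mem_cons_of_mem _ he', h1, h2⟩)
      · rintro (h | ⟨e', he', h1, h2⟩)
        · exact Or.inl (List.mem_append.mpr (Or.inl h))
        · rcases List.mem_cons.mp he' with rfl | he'
          · exact Or.inl (List.mem_append.mpr (Or.inr (by simp [h2])))
          · exact Or.inr ⟨e', he', h1, h2⟩
    · rw [if_neg (by tauto)]
      constructor
      · rintro (h | ⟨e', he', h1, h2⟩)
        · exact Or.inl h
        · exact Or.inr ⟨e', List.mem_cons_of_mem _ he', h1, h2⟩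
      · rintro (h | ⟨e', he', h1, h2⟩)
        · exact Or.inl h
        · rcases List.mem_cons.mp he' with rfl | he'
          · exfalso; apply hc; rw [h1]
          · exact Or.inr ⟨e', he', h1, h2⟩

theorem pvWfBuild (n : Nat) (k val : Int × Int → Int) :
    ∀ (l : List (Int × Int)) (acc : List (List Int)),
      (∀ (i : Nat), ∀ v ∈ acc.getD i [], 0 ≤ v ∧ v.toNat < n) →
      (∀ e ∈ l, 0 ≤ val e ∧ (val e).toNat < n) →
      pvWf n (l.foldl (fun acc e => acc.modify (k e).toNat (fun bl => bl ++ [val e])) acc) := by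
  intro l
  induction l with
  | nil => intro acc hacc _; exact hacc
  | cons e t ih =>
    intro acc hacc hl
    simp only [List.foldl_cons]
    refine ih _ ?_ (fun x hx => hl x (List.mem_cons_of_mem _ hx))
    intro i v hv
    rw [pvGetD_modify] at hv
    by_cases hc : (k e).toNat = i ∧ i < acc.length
    · rw [if_pos hc] at hv
      rcases List.mem_append.mp hv with h | h
      · exact hacc i v h
      · simp only [List.mem_singleton] at h
        subst h
        exact hl e (List.mem_cons_self ..)
    · rw [if_neg hc] at hv
      exact hacc i v hv

theorem pvWfReplicate (n : Nat) : ∀ (i : Nat), ∀ v ∈ (List.replicate n ([] : List Int)).getD i [],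
    0 ≤ v ∧ v.toNat < n := by
  intro i v hv
  rw [pvGetD_replicate] at hv
  cases hv

-- all(visited) bridge
theorem pvAll_iff (l : List Bool) :
    (l.all (fun b => b) = true) ↔ ∀ j : Nat, j < l.length → l.getD j false = true := by
  rw [List.all_eq_true]
  constructor
  · intro h j hj
    rw [List.getD_eq_getElem?_getD, List.getElem?_eq_getElem hj]
    exact h _ (List.getElem_mem hj)
  · intro h b hb
    rcases List.mem_iff_getElem.mp hb with ⟨j, hj, rfl⟩
    have := h j hj
    rw [List.getD_eq_getElem?_getD, List.getElem?_eq_getElem hj] at this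
    simpa using this

-- rv.index(True)
theorem pvIndexLemma : ∀ (l : List Bool) (j : Nat), j < l.length → l.getD j false = true →
    (∀ k : Nat, k < j → l.getD k false = false) → PySem.List.index? l true = some j := by
  intro l
  induction l with
  | nil => intro j h; simp at h
  | cons a t ih =>
    intro j hj hget hmin
    cases j with
    | zero =>
      have : a = true := by simpa [List.getD] using hget
      subst this
      exact PySem.List.index?_cons_self ..
    | succ j =>
      have ha : a = false := by simpa [List.getD] using hmin 0 (Nat.succ_pos j)
      subst ha
      have h2 := PySem.List.index?_cons_of_ne (x := false) (v := true) t (by simp)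
      rw [h2, ih j (by simpa using hj) (by simpa [List.getD] using hget)
        (fun k hk => by simpa [List.getD] using hmin (k+1) (by omega))]
      rfl

-- ===== VERDICT (by name: the statement is the Claim_ definition above) =====
theorem findMotherVertex_spec : Claim_equal_findMotherVertex := by
  intro V edges _ hpre
  obtain ⟨hV, hE⟩ := hpre
  unfold Spec_findMotherVertex
  simp only [findMotherVertex, findMotherVertex_alt, pvBuildPair]
  set n := V.toNat with hn
  set adj := pvBuildAdj n edges with hadj
  set radj := pvBuildRAdj n edges with hradj
  set fresh := List.replicate n false with hfresh
  have hn1 : 1 ≤ n := by omega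
  have hE1 : ∀ e ∈ edges, 0 ≤ e.1 ∧ e.1.toNat < n := by
    intro e he; have := hE e he; omega
  have hE2 : ∀ e ∈ edges, 0 ≤ e.2 ∧ e.2.toNat < n := by
    intro e he; have := hE e he; omega
  have hwfA : pvWf n adj := pvWfBuild n _ _ edges _ (pvWfReplicate n) hE2
  have hwfR : pvWf n radj := pvWfBuild n _ _ edges _ (pvWfReplicate n) hE1
  have hmemA : ∀ a b : Int, pvInR n a → (b ∈ adj.getD a.toNat [] ↔ (a, b) ∈ edges) := by
    intro a b ha
    rw [hadj]
    unfold pvBuildAdj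
    rw [pvMemBuild n _ _ edges _ (by simp) hE1 a b ha]
    rw [pvGetD_replicate]
    simp only [List.not_mem_nil, false_or]
    constructor
    · rintro ⟨e, he, h1, h2⟩
      rcases e with ⟨u, v⟩
      simp only at h1 h2
      rw [← h1, ← h2] at *
      exact he
    · intro h
      exact ⟨(a, b), h, rfl, rfl⟩
  have hmemR : ∀ a b : Int, pvInR n a → (b ∈ radj.getD a.toNat [] ↔ (b, a) ∈ edges) := by
    intro a b ha
    rw [hradj]
    unfold pvBuildRAdj
    rw [pvMemBuild n _ _ edges _ (by simp) hE2 a b ha]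
    rw [pvGetD_replicate]
    simp only [List.not_mem_nil, false_or]
    constructor
    · rintro ⟨e, he, h1, h2⟩
      rcases e with ⟨u, v⟩
      simp only at h1 h2
      rw [← h1, ← h2] at *
      exact he
    · intro h
      exact ⟨(b, a), h, rfl, rfl⟩
  have hdual : ∀ a b : Int, pvInR n a → pvInR n b →
      (b ∈ adj.getD a.toNat [] ↔ a ∈ radj.getD b.toNat []) := by
    intro a b ha hb
    rw [hmemA a b ha, hmemR b a hb]
  -- phase 1: identical restart loops
  have hVpos : (0 : Int) < V := by omega
  rw [PySem.List.pyRange_one_cons hVpos]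
  simp only [List.foldl_cons]
  have hg0 : fresh.getD (0 : Int).toNat false = false := by
    rw [hfresh]; exact pvGetD_replicate ..
  have h0in : pvInR n (0 : Int) := ⟨le_refl _, by simpa using hn1⟩
  have hg0' : ¬ fresh.getD (0 : Int).toNat false = true := by rw [hg0]; simp
  have h0A : pvStepA adj n (fresh, -1) 0 = (dfsA adj n 0 fresh, 0) := by
    unfold pvStepA; rw [if_neg hg0']
  have h0B : pvStepB adj n (fresh, -1) 0 = (dfsA adj n 0 fresh, 0) := by
    unfold pvStepB
    rw [if_neg hg0', pvDfsEqSweep adj n hwfA h0in (by rw [hfresh]; exact List.length_replicate ..) hg0]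
  rw [h0A, h0B]
  have hp0len : (dfsA adj n 0 fresh).length = n := by
    rw [← (pvMonoA adj n 0 fresh).1, hfresh]; exact List.length_replicate ..
  obtain ⟨hfold, hstlen, hxin⟩ := pvPhase1 adj n hwfA (PySem.List.pyRange (0+1) V 1)
    (by
      intro i hi
      rw [PySem.List.mem_pyRange_one] at hi
      exact ⟨by omega, by omega⟩)
    (dfsA adj n 0 fresh, 0) hp0len h0in
  rw [← hfold]
  set st := (PySem.List.pyRange (0+1) V 1).foldl (pvStepA adj n) (dfsA adj n 0 fresh, 0) with hst
  set x := st.2 with hx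
  have hfreshlen : fresh.length = n := by rw [hfresh]; exact List.length_replicate ..
  have hfreshget : ∀ w : Int, fresh.getD w.toNat false = false := by
    intro w; rw [hfresh]; exact pvGetD_replicate ..
  have hfreshgetN : ∀ j : Nat, fresh.getD j false = false := by
    intro j; rw [hfresh]; exact pvGetD_replicate ..
  -- the cover check is the same list in both programs
  have hcovEq : pvSweepB adj n x fresh = dfsA adj n x fresh :=
    (pvDfsEqSweep adj n hwfA hxin hfreshlen (hfreshget x)).symm
  rw [hcovEq]
  by_cases hall : (dfsA adj n x fresh).all (fun b => b) = true
  · rw [if_pos hall, if_pos hall]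
    -- characterisation of "fresh dfs from u covers everything"
    have hcovChar : ∀ u : Int, pvInR n u →
        ((dfsA adj n u fresh).all (fun b => b) = true ↔
          ∀ j : Nat, j < n → pvRA adj fresh u (j : Int)) := by
      intro u hu
      have hdl : (dfsA adj n u fresh).length = n := by
        rw [← (pvMonoA adj n u fresh).1]; exact hfreshlen
      rw [pvAll_iff, hdl]
      refine forall_congr' fun j => imp_congr_right fun hj => ?_
      have hc := pvCharA adj n hwfA hu hfreshlen (hfreshget u)
        (w := (j : Int)) ⟨Int.natCast_nonneg j, by simpa using hj⟩
      rw [Int.toNat_natCast] at hc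
      rw [hc, hfreshgetN j]
      simp
    have hcovAll : ∀ j : Nat, j < n → pvRA adj fresh x (j : Int) :=
      (hcovChar x hxin).mp hall
    set rv := pvSweepB radj n x fresh with hrv
    have hrvlen : rv.length = n := by
      have h := (pvLe_trans (pvLe_set fresh x.toNat) (pvMonoLoop radj n [x] (fresh.set x.toNat true))).1
      rw [hrv]
      unfold pvSweepB
      rw [← h]
      exact hfreshlen
    have hrvIff : ∀ j : Nat, j < n → (rv.getD j false = true ↔ pvRA adj fresh (j : Int) x) := by
      intro j hj
      have hjin : pvInR n ((j : Int)) := ⟨Int.natCast_nonneg j, by simpa using hj⟩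
      have hc := pvCharB radj n hwfR hxin hfreshlen (hfreshget x) (w := (j : Int)) hjin
      rw [Int.toNat_natCast] at hc
      rw [hrv, hc, hfreshgetN j]
      simp only [Bool.false_eq_true, false_or]
      constructor
      · intro h
        exact pvRA_rev hwfR (fun a b ha hb => (hdual b a hb ha).symm) hxin h
      · intro h
        exact pvRA_rev hwfA hdual hjin h
    have hPx : rv.getD x.toNat false = true := by
      rw [hrvIff x.toNat hxin.2, Int.toNat_of_nonneg hxin.1]
      exact pvRA.refl x
    have hex : ∃ j : Nat, rv.getD j false = true := ⟨x.toNat, hPx⟩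
    set j₀ := Nat.find hex with hj₀def
    have hj₀ : rv.getD j₀ false = true := Nat.find_spec hex
    have hmin : ∀ k : Nat, k < j₀ → rv.getD k false = false := by
      intro k hk
      have := Nat.find_min hex hk
      simpa using this
    have hle : j₀ ≤ x.toNat := Nat.find_min' hex hPx
    have hj₀n : j₀ < n := by have := hxin.2; omega
    -- B's value
    have hidx : PySem.List.index? rv true = some j₀ :=
      pvIndexLemma rv j₀ (by omega) hj₀ hmin
    -- A's value: the scan finds the same least index
    have hpred : ∀ i : Int, 0 ≤ i → i.toNat < n →
        ((dfsA adj n i fresh).all (fun b => b) = true ↔ rv.getD i.toNat false = true) := by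
      intro i hi0 hin
      rw [hcovChar i ⟨hi0, hin⟩]
      constructor
      · intro h
        rw [hrvIff i.toNat hin, Int.toNat_of_nonneg hi0]
        have := h x.toNat hxin.2
        rwa [Int.toNat_of_nonneg hxin.1] at this
      · intro h j hj
        rw [hrvIff i.toNat hin, Int.toNat_of_nonneg hi0] at h
        exact pvRA_trans h (hcovAll j hj)
    have hx0 : 0 ≤ x := hxin.1
    have hfind : (PySem.List.pyRange 0 (x+1) 1).find?
        (fun i => (dfsA adj n i fresh).all (fun b => b)) = some ((j₀ : Nat) : Int) := by
      rw [PySem.List.pyRange_one_append 0 ((j₀ : Nat) : Int) (x+1)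
        (Int.natCast_nonneg j₀) (by omega), List.find?_append]
      have hnone : (PySem.List.pyRange 0 ((j₀ : Nat) : Int) 1).find?
          (fun i => (dfsA adj n i fresh).all (fun b => b)) = none := by
        rw [List.find?_eq_none]
        intro i hi
        rw [PySem.List.mem_pyRange_one] at hi
        have hin : i.toNat < n := by omega
        intro hcontra
        have := (hpred i hi.1 hin).mp hcontra
        rw [hmin i.toNat (by omega)] at this
        cases this
      rw [hnone, PySem.List.pyRange_one_cons (by omega)]
      have hpos : (fun i => (dfsA adj n i fresh).all (fun b => b)) ((j₀ : Nat) : Int) = true := by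
        have := (hpred ((j₀ : Nat) : Int) (Int.natCast_nonneg j₀) (by simpa using hj₀n)).mpr
        rw [Int.toNat_natCast] at this
        exact this hj₀
      simp only [List.find?_cons, hpos, if_true]
      rfl
    rw [hfind, hidx]
  · rw [if_neg hall, if_neg hall]
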